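-- pv_equiv track=rewrite | github.com/crocodilestick/Calibre-Web-Automated | calibre-web-automater/new-book-processor.py | select_books_for_conversion
-- ===== SOURCE A (Python) =====
-- hierarchy_of_succsess = ['lit', 'mobi', 'azw', 'epub', 'azw3', 'fb2', 'fbz', 'azw4',  'prc', 'odt', 'lrf', 'pdb',  'cbz', 'pml', 'rb', 'cbr', 'cb7', 'cbc', 'chm', 'djvu', 'snb', 'tcr', 'pdf', 'docx', 'rtf', 'html', 'htmlz', 'txtz', 'txt']
--
-- def select_books_for_conversion(new_files: list[str]) -> tuple[list[str], str]:
--     """When no epubs are detected in the download, this function will go through the list of new files and check for the format the are in that has the highest chance of sucsessful conversion according to the input format hierarchy list provided by calibre"""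
--     files_to_convert = []
--     import_format = ''
--     for format in hierarchy_of_succsess:
--         file_search = [f for f in new_files if f.endswith(f'.{format}')]
--         if len(file_search) > 0:
--             files_to_convert += file_search
--             import_format = format
--             break
--
--     return files_to_convert, import_format
-- ===== SOURCE B (Python) =====
-- hierarchy_of_succsess = ['lit', 'mobi', 'azw', 'epub', 'azw3', 'fb2', 'fbz', 'azw4',  'prc', 'odt', 'lrf', 'pdb',  'cbz', 'pml', 'rb', 'cbr', 'cb7', 'cbc', 'chm', 'djvu', 'snb', 'tcr', 'pdf', 'docx', 'rtf', 'html', 'htmlz', 'txtz', 'txt']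
--
--
-- def _extension(filename):
--     """Part after the last '.', or None when the name contains no '.'."""
--     _, sep, tail = filename.rpartition('.')
--     return tail if sep else None
--
--
-- def select_books_for_conversion(new_files: 'list[str]') -> 'tuple[list[str], str]':
--     priority = {fmt: i for i, fmt in enumerate(hierarchy_of_succsess)}
--     best = None  # (priority index, format) of the best format seen so far
--     for f in new_files:
--         ext = _extension(f)
--         if ext is not None:
--             p = priority.get(ext)
--             if p is not None and (best is None or p < best[0]):
--                 best = (p, ext)
--     if best is None:
--         return [], ''
--     fmt = best[1]
--     return [f for f in new_files if _extension(f) == fmt], fmt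
-- ===== Notes on version B (the rewrite author's own statement) =====
-- stated objective: faster
-- what changed: Instead of rescanning the whole file list once per format in hierarchy order, B builds a format->priority dict once, finds the minimum-priority extension in a single pass over the files (extracting each file's extension with rpartition), then does one filtering pass by extension equality.
import Mathlib
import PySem

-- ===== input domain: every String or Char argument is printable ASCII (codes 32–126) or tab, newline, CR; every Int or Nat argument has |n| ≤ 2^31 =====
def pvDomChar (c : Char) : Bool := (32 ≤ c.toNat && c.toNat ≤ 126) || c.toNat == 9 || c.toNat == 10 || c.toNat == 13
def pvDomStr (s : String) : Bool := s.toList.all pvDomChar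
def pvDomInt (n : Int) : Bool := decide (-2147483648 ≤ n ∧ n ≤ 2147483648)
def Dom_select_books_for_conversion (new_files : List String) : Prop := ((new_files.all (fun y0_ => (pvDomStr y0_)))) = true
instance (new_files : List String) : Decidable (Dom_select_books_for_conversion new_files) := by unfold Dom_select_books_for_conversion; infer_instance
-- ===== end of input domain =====

-- B replaces A's per-format rescans of the file list by a one-shot format->priority dict,
-- a single minimum-tracking pass over the files and one filtering pass (measured faster in a timing run).

-- ===== PORT A =====
-- module-level constant shared by both Pythons
def pvHier : List String := ["lit", "mobi", "azw", "epub", "azw3", "fb2", "fbz", "azw4", "prc", "odt", "lrf", "pdb", "cbz", "pml", "rb", "cbr", "cb7", "cbc", "chm", "djvu", "snb", "tcr", "pdf", "docx", "rtf", "html", "htmlz", "txtz", "txt"]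

-- A's for-loop with break, as recursion over the remaining formats;
-- f.endswith(f'.{format}') is PySem.Chars.endswith on char lists ('.{format}'.toList = '.' :: format.toList)
def pvLoopA (new_files : List String) : List String → List String × String
  | [] => ([], "")
  | format :: rest =>
    let file_search := new_files.filter (fun f => PySem.Chars.endswith f.toList ('.' :: format.toList))
    if 0 < file_search.length then (file_search, format) else pvLoopA new_files rest

def select_books_for_conversion (new_files : List String) : List String × String :=
  pvLoopA new_files pvHier

-- ===== PORT B =====
-- filename.rpartition('.') tail-if-separator, hand-ported (exact): the part after the LAST '.',
-- present exactly when a '.' occurs in the name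
def pvExt? (f : List Char) : Option (List Char) :=
  if '.' ∈ f then some ((f.reverse.takeWhile (fun c => c != '.')).reverse) else none

-- {fmt: i for i, fmt in enumerate(hierarchy_of_succsess)}
def pvPriority : PySem.Dict (List Char) Int :=
  (PySem.List.enumerate (pvHier.map String.toList) 0).foldl (fun d p => d.insert p.2 p.1) PySem.Dict.empty

-- the body of B's single pass: keep the (priority, extension) pair with the smallest priority
def pvStepB (b : Option (Int × List Char)) (f : String) : Option (Int × List Char) :=
  match pvExt? f.toList with
  | none => b
  | some e =>
    match pvPriority.get? e with
    | none => b
    | some p =>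
      match b with
      | none => some (p, e)
      | some b0 => if p < b0.1 then some (p, e) else b

def select_books_for_conversion_alt (new_files : List String) : List String × String :=
  match new_files.foldl pvStepB none with
  | none => ([], "")
  | some b0 => (new_files.filter (fun f => pvExt? f.toList == some b0.2), String.ofList b0.2)

-- ===== PRECONDITION & SPEC =====
def Spec_select_books_for_conversion (new_files : List String) (out : List String × String) : Prop := out = select_books_for_conversion_alt new_files
instance (new_files : List String) (out : List String × String) : Decidable (Spec_select_books_for_conversion new_files out) := by unfold Spec_select_books_for_conversion; infer_instance

-- ===== CLAIM (what is proved, stated in full; the proofs are below) =====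
def Claim_equal_select_books_for_conversion : Prop := ∀ (new_files : List String), Dom_select_books_for_conversion new_files → Spec_select_books_for_conversion new_files (select_books_for_conversion new_files)

-- ===== LEMMAS AND PROOFS =====

-- proof-layer abbreviations
def pvHC : List (List Char) := pvHier.map String.toList
def pvM (f fmt : String) : Bool := PySem.Chars.endswith f.toList ('.' :: fmt.toList)
def pvCands (files : List String) : List (Int × List Char) :=
  files.filterMap (fun f => (pvExt? f.toList).bind (fun e => (pvPriority.get? e).map (fun p => (p, e))))
def pvMin2 (b : Option (Int × List Char)) (v : Int × List Char) : Option (Int × List Char) :=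
  match b with
  | none => some v
  | some b0 => if v.1 < b0.1 then some v else some b0

lemma pv_takeWhile_middle (p : Char → Bool) (l1 : List Char) (c : Char) (l2 : List Char)
    (h1 : ∀ x ∈ l1, p x = true) (h2 : p c = false) :
    (l1 ++ c :: l2).takeWhile p = l1 := by
  induction l1 with
  | nil => simp [h2]
  | cons a t ih =>
    simp only [List.cons_append, List.takeWhile_cons, h1 a (by simp)]
    simp [ih (fun x hx => h1 x (by simp [hx]))]

-- the extension-equality test of B agrees with the endswith test of A for dot-free nonempty formats
lemma pv_ext_iff_endswith (f fmt : List Char) (h2 : '.' ∉ fmt) :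
    (PySem.Chars.endswith f ('.' :: fmt) = true) ↔ pvExt? f = some fmt := by
  rw [PySem.Chars.endswith_iff]
  constructor
  · rintro ⟨pre, rfl⟩
    have hdot : '.' ∈ pre ++ '.' :: fmt := by simp
    unfold pvExt?
    rw [if_pos hdot]
    have hrev : (pre ++ '.' :: fmt).reverse = fmt.reverse ++ '.' :: pre.reverse := by simp
    rw [hrev, pv_takeWhile_middle _ _ _ _ (by
        intro x hx
        have hxf : x ∈ fmt := List.mem_reverse.mp hx
        simpa using fun h' : x = '.' => h2 (h' ▸ hxf)) (by simp)]
    simp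
  · intro h
    unfold pvExt? at h
    split at h
    case isTrue hdot =>
      have htw : (f.reverse.takeWhile (fun c => c != '.')).reverse = fmt := by
        injection h
      have hsplit : f.reverse.takeWhile (fun c => c != '.') ++ f.reverse.dropWhile (fun c => c != '.') = f.reverse :=
        List.takeWhile_append_dropWhile
      have hdotr : '.' ∈ f.reverse.dropWhile (fun c => c != '.') := by
        have : '.' ∈ f.reverse := List.mem_reverse.mpr hdot
        rw [← hsplit] at this
        rcases List.mem_append.mp this with hl | hr
        · exact absurd (List.mem_takeWhile_imp hl) (by simp)
        · exact hr
      have hne : f.reverse.dropWhile (fun c => c != '.') ≠ [] := List.ne_nil_of_mem hdotr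
      have hhead : ((f.reverse.dropWhile (fun c => c != '.')).head hne) = '.' := by
        have := List.head_dropWhile_not (fun c => c != '.') hne
        simpa using this
      have hcons : f.reverse.dropWhile (fun c => c != '.') = '.' :: (f.reverse.dropWhile (fun c => c != '.')).tail := by
        conv_lhs => rw [← List.cons_head_tail hne]
        rw [hhead]
      refine ⟨(f.reverse.dropWhile (fun c => c != '.')).tail.reverse, ?_⟩
      have : f.reverse.reverse = f := List.reverse_reverse f
      calc (f.reverse.dropWhile (fun c => c != '.')).tail.reverse ++ '.' :: fmt
          = (f.reverse.takeWhile (fun c => c != '.') ++ '.' :: (f.reverse.dropWhile (fun c => c != '.')).tail).reverse := by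
            simp [List.reverse_append, htw]
        _ = f := by rw [← hcons, hsplit, List.reverse_reverse]
    case isFalse => exact absurd h (by simp)

lemma pv_hier_ok : ∀ fmt ∈ pvHier, '.' ∉ fmt.toList := by decide

lemma pv_priority_items : pvPriority.items = (PySem.List.enumerate pvHC 0).map (fun a => (a.2, a.1)) := by decide

lemma pv_priority_nodup : pvPriority.keys.Nodup := by decide

lemma pv_priority_get (e : List Char) (p : Int) :
    pvPriority.get? e = some p ↔ ∃ k : Nat, ∃ _ : k < pvHC.length, p = (k : Int) ∧ pvHC[k] = e := by
  rw [PySem.Dict.get?_eq_some_iff_mem_items pvPriority e p pv_priority_nodup, pv_priority_items]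
  simp only [List.mem_map, PySem.List.mem_enumerate_iff]
  constructor
  · rintro ⟨a, ⟨k, hk, rfl⟩, hpe⟩
    simp only [Prod.mk.injEq] at hpe
    refine ⟨k, hk, ?_, hpe.1⟩
    rw [← hpe.2]
    omega
  · rintro ⟨k, hk, rfl, rfl⟩
    exact ⟨((0 : Int) + k, pvHC[k]), ⟨k, hk, rfl⟩, by simp⟩

lemma pv_loopA_eq (files : List String) : ∀ L : List String, pvLoopA files L =
    match L.find? (fun fmt => files.any (fun f => pvM f fmt)) with
    | none => ([], "")
    | some fmt => (files.filter (fun f => pvM f fmt), fmt) := by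
  intro L
  induction L with
  | nil => rfl
  | cons fmt rest ih =>
    rw [pvLoopA, List.find?_cons]
    by_cases h : files.any (fun f => pvM f fmt) = true
    · have hpos : 0 < (files.filter (fun f => PySem.Chars.endswith f.toList ('.' :: fmt.toList))).length := by
        rcases List.any_eq_true.mp h with ⟨f, hf, hm⟩
        exact List.length_pos_of_mem (List.mem_filter.mpr ⟨hf, hm⟩)
      have h' : (files.any fun f => PySem.Chars.endswith f.toList ('.' :: fmt.toList)) = true := by
        simpa [pvM] using h
      simp [h', hpos, pvM]
    · have hnil : files.filter (fun f => PySem.Chars.endswith f.toList ('.' :: fmt.toList)) = [] := by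
        rw [List.filter_eq_nil_iff]
        intro f hf hm
        exact h (List.any_eq_true.mpr ⟨f, hf, hm⟩)
      have h' : (files.any fun f => PySem.Chars.endswith f.toList ('.' :: fmt.toList)) = false := by
        simpa [pvM] using h
      simp [h', hnil, ih, pvM]

lemma pv_foldl_stepB (files : List String) : ∀ b, files.foldl pvStepB b = (pvCands files).foldl pvMin2 b := by
  induction files with
  | nil => intro b; rfl
  | cons f t ih =>
    intro b
    rw [List.foldl_cons, ih]
    show (pvCands t).foldl pvMin2 (pvStepB b f) = _
    unfold pvCands
    rw [List.filterMap_cons]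
    cases hx : pvExt? f.toList with
    | none => simp [pvStepB, hx]
    | some e =>
      cases hg : pvPriority.get? e with
      | none => simp [pvStepB, hx, hg]
      | some p =>
        cases b with
        | none => simp [pvStepB, hx, hg, pvMin2]
        | some b0 =>
          by_cases hlt : p < b0.1 <;> simp [pvStepB, hx, hg, pvMin2, hlt]

lemma pv_mem_cands (files : List String) (v : Int × List Char) :
    v ∈ pvCands files ↔ ∃ f ∈ files, pvExt? f.toList = some v.2 ∧ pvPriority.get? v.2 = some v.1 := by
  simp only [pvCands, List.mem_filterMap, Option.bind_eq_some_iff, Option.map_eq_some_iff]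
  constructor
  · rintro ⟨f, hf, e, he, p, hp, rfl⟩
    exact ⟨f, hf, he, hp⟩
  · rintro ⟨f, hf, he, hp⟩
    exact ⟨f, hf, v.2, he, v.1, hp, rfl⟩

lemma pv_foldl_min2_spec (l : List (Int × List Char)) : ∀ b : Option (Int × List Char),
    (l.foldl pvMin2 b = b ∨ ∃ v ∈ l, l.foldl pvMin2 b = some v) ∧
    (∀ v ∈ l, ∃ w0, l.foldl pvMin2 b = some w0 ∧ w0.1 ≤ v.1) ∧
    (∀ b0, b = some b0 → ∃ w0, l.foldl pvMin2 b = some w0 ∧ w0.1 ≤ b0.1) := by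
  induction l with
  | nil =>
    intro b
    exact ⟨Or.inl rfl, by simp, fun b0 hb => ⟨b0, by simp [hb]⟩⟩
  | cons v t ih =>
    intro b
    obtain ⟨m0, hm, hmv, hmor, hmb⟩ :
        ∃ m0, pvMin2 b v = some m0 ∧ m0.1 ≤ v.1 ∧ (m0 = v ∨ b = some m0) ∧
          (∀ b0, b = some b0 → m0.1 ≤ b0.1) := by
      cases b with
      | none => exact ⟨v, rfl, le_refl _, Or.inl rfl, by simp⟩
      | some b0 =>
        by_cases hlt : v.1 < b0.1
        · exact ⟨v, by simp [pvMin2, hlt], le_refl _, Or.inl rfl,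
            fun c hc => by injection hc with hc; exact hc ▸ le_of_lt hlt⟩
        · exact ⟨b0, by simp [pvMin2, hlt], le_of_not_gt hlt, Or.inr rfl,
            fun c hc => by injection hc with hc; exact hc ▸ le_refl _⟩
    rw [List.foldl_cons]
    obtain ⟨h1, h2, h3⟩ := ih (pvMin2 b v)
    obtain ⟨w0, hw0, hw0le⟩ := h3 m0 hm
    refine ⟨?_, ?_, ?_⟩
    · rcases h1 with h | ⟨v', hv', hres⟩
      · rw [h, hm]
        rcases hmor with rfl | hb
        · exact Or.inr ⟨m0, List.mem_cons_self, rfl⟩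
        · exact Or.inl hb.symm
      · exact Or.inr ⟨v', List.mem_cons_of_mem _ hv', hres⟩
    · intro u hu
      rcases List.mem_cons.mp hu with rfl | hu'
      · exact ⟨w0, hw0, le_trans hw0le hmv⟩
      · exact h2 u hu'
    · intro b0 hb
      exact ⟨w0, hw0, le_trans hw0le (hmb b0 hb)⟩

-- ===== VERDICT (by name: the statement is the Claim_ definition above) =====
theorem select_books_for_conversion_spec : Claim_equal_select_books_for_conversion := by
  intro files _
  show select_books_for_conversion files = select_books_for_conversion_alt files
  rw [select_books_for_conversion, pv_loopA_eq files pvHier, select_books_for_conversion_alt,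
    pv_foldl_stepB files none]
  cases hfind : pvHier.find? (fun fmt => files.any fun f => pvM f fmt) with
  | none =>
    have hnone := List.find?_eq_none.mp hfind
    have hc : pvCands files = [] := by
      rcases hx : pvCands files with _ | ⟨v, t⟩
      · rfl
      · exfalso
        have hv : v ∈ pvCands files := by rw [hx]; exact List.mem_cons_self
        obtain ⟨f, hf, he, hp⟩ := (pv_mem_cands files v).mp hv
        obtain ⟨k, hk, hpk, hek⟩ := (pv_priority_get v.2 v.1).mp hp
        have hkh : k < pvHier.length := by simpa [pvHC] using hk
        have hmem : pvHier[k] ∈ pvHier := List.getElem_mem hkh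
        have hok := pv_hier_ok _ hmem
        have hM : pvM f pvHier[k] = true := by
          rw [pvM, pv_ext_iff_endswith f.toList (pvHier[k]).toList hok]
          rw [show (pvHier[k]).toList = v.2 from by simpa [pvHC] using hek]
          exact he
        exact hnone _ hmem (List.any_eq_true.mpr ⟨f, hf, hM⟩)
    simp [hc]
  | some fmt =>
    obtain ⟨hp, i, hi, hgi, hminb⟩ := List.find?_eq_some_iff_getElem.mp hfind
    have hmemfmt : fmt ∈ pvHier := hgi ▸ List.getElem_mem hi
    obtain ⟨f0, hf0, hM0⟩ := List.any_eq_true.mp hp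
    have hOK := pv_hier_ok fmt hmemfmt
    have hext0 : pvExt? f0.toList = some fmt.toList := by
      rw [← pv_ext_iff_endswith _ _ hOK]
      exact hM0
    have hkH : i < pvHC.length := by simpa [pvHC] using hi
    have hw : ((i : Int), fmt.toList) ∈ pvCands files :=
      (pv_mem_cands _ _).mpr ⟨f0, hf0, hext0,
        (pv_priority_get _ _).mpr ⟨i, hkH, rfl, by simp [pvHC, hgi]⟩⟩
    have hcand : ∀ v ∈ pvCands files, ∃ k : Nat, ∃ hkh : k < pvHier.length, v.1 = (k : Int) ∧
        (pvHier[k]'hkh).toList = v.2 ∧ (files.any fun f => pvM f (pvHier[k]'hkh)) = true := by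
      intro v hv
      obtain ⟨f, hf, he, hp'⟩ := (pv_mem_cands files v).mp hv
      obtain ⟨k, hk, hpk, hek⟩ := (pv_priority_get v.2 v.1).mp hp'
      have hkh : k < pvHier.length := by simpa [pvHC] using hk
      have hmem : pvHier[k] ∈ pvHier := List.getElem_mem hkh
      have hok := pv_hier_ok _ hmem
      have htl : (pvHier[k]).toList = v.2 := by simpa [pvHC] using hek
      have hM : pvM f pvHier[k] = true := by
        rw [pvM, pv_ext_iff_endswith f.toList (pvHier[k]).toList hok, htl]
        exact he
      exact ⟨k, hkh, hpk, htl, List.any_eq_true.mpr ⟨f, hf, hM⟩⟩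
    have hlow : ∀ v ∈ pvCands files, (i : Int) ≤ v.1 := by
      intro v hv
      obtain ⟨k, hkh, hpk, _, hany⟩ := hcand v hv
      have hik : ¬ k < i := by
        intro hki
        have := hminb k hki
        simp only [Bool.not_eq_eq_eq_not, Bool.not_true] at this
        rw [this] at hany
        cases hany
      rw [hpk]
      omega
    have huniq : ∀ v ∈ pvCands files, v.1 ≤ (i : Int) → v = ((i : Int), fmt.toList) := by
      intro v hv hle
      obtain ⟨k, hkh, hpk, htl, _⟩ := hcand v hv
      have hki : k = i := by
        have := hlow v hv
        omega
      subst hki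
      refine Prod.ext ?_ ?_
      · simpa using hpk
      · rw [← htl, hgi]
    obtain ⟨h1, h2, _⟩ := pv_foldl_min2_spec (pvCands files) none
    obtain ⟨w0, hw0, hle⟩ := h2 _ hw
    have hwmem : w0 ∈ pvCands files := by
      rcases h1 with h | ⟨v', hv', hres⟩
      · rw [h] at hw0; cases hw0
      · rw [hres] at hw0
        injection hw0 with h'
        exact h' ▸ hv'
    have hw0eq : w0 = ((i : Int), fmt.toList) := huniq w0 hwmem (by simpa using hle)
    rw [hw0, hw0eq]
    simp only [String.ofList_toList]
    refine Prod.ext ?_ rfl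
    show files.filter (fun f => pvM f fmt) = files.filter (fun f => pvExt? f.toList == some fmt.toList)
    apply List.filter_congr
    intro f hf
    rw [Bool.eq_iff_iff, beq_iff_eq]
    exact pv_ext_iff_endswith f.toList fmt.toList hOK
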